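-- pv_equiv track=rewrite | github.com/muttaqee/partner-map | read-partner-technology-ratings.py | acceptString
-- ===== SOURCE A (Python) =====
-- def acceptString(s):
--     acceptable_strings = [
--     "A", "B", "C", "D", "E", "F"
--     ]
--     for string in acceptable_strings:
--         if s == string:
--             return True;
--     return False;
-- ===== SOURCE B (Python) =====
-- def acceptString(s):
--     return isinstance(s, str) and len(s) == 1 and "A" <= s <= "F"
-- ===== Notes on version B (the rewrite author's own statement) =====
-- stated objective: idiomatic
-- what changed: The six-literal equality loop is replaced by a closed-form range test: s is acceptable iff it is a single-character string lexicographically between "A" and "F".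
import Mathlib
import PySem

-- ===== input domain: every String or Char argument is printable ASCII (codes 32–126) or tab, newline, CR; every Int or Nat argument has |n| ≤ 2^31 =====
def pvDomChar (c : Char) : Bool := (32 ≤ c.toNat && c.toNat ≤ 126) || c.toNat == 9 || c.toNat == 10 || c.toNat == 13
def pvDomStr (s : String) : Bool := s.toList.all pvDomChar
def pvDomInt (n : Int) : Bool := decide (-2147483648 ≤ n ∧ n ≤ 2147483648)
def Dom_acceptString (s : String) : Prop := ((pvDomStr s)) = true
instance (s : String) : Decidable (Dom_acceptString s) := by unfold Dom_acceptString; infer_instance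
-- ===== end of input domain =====

-- B replaces A's six-literal equality loop by a closed-form range test (single char between "A" and "F"); objective: idiomatic.


-- ===== PORT A =====
-- the for-loop with early `return True` over the six literals is the standard any-fold;
-- Python string equality is char-list equality, compared here on toList (exact)
def acceptString (s : String) : Bool :=
  let acceptable_strings : List String := ["A", "B", "C", "D", "E", "F"]
  acceptable_strings.any (fun t => s.toList == t.toList)

-- ===== PORT B =====
-- Python's lexicographic `<=` on strings, exact on char lists (compares code points left to right)
def pyStrLe : List Char → List Char → Bool
  | [], _ => true
  | _ :: _, [] => false
  | a :: as, b :: bs => if a < b then true else if b < a then false else pyStrLe as bs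

-- Source B: isinstance(s, str) (always true here) and len(s) == 1 and "A" <= s <= "F"
def acceptString_alt (s : String) : Bool :=
  PySem.Str.len s == 1 && pyStrLe "A".toList s.toList && pyStrLe s.toList "F".toList

-- ===== PRECONDITION & SPEC =====
def Spec_acceptString (s : String) (out : Bool) : Prop := out = acceptString_alt s
instance (s : String) (out : Bool) : Decidable (Spec_acceptString s out) := by unfold Spec_acceptString; infer_instance

-- ===== CLAIM (what is proved, stated in full; the proofs are below) =====
def Claim_equal_acceptString : Prop := ∀ (s : String), Dom_acceptString s → Spec_acceptString s (acceptString s)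

-- ===== LEMMAS AND PROOFS =====
theorem char_eq_toNat (c d : Char) : (c = d) ↔ (c.toNat = d.toNat) :=
  ⟨fun h => by rw [h], fun h => Char.ext (UInt32.toNat_inj.mp h)⟩

theorem char_lt_toNat (c d : Char) : (c < d) ↔ (c.toNat < d.toNat) := Iff.rfl

-- the heart of the equivalence: membership in {"A",…,"F"} is the A–F range test, per char-list shape
theorem accept_eq_on_list (l : List Char) :
    (["A", "B", "C", "D", "E", "F"].any (fun t : String => l == t.toList)) =
      (((l.length : Int) == 1) && pyStrLe "A".toList l && pyStrLe l "F".toList) := by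
  match l with
  | [] => decide
  | [c] =>
    rw [Bool.eq_iff_iff]
    simp only [List.any_cons, List.any_nil, Bool.or_false, String.reduceToList, Bool.or_eq_true,
      beq_iff_eq, List.cons.injEq, and_true, pyStrLe, List.length_cons, List.length_nil,
      Bool.and_eq_true, char_eq_toNat]
    split_ifs with h1 h2 h3 h4 h5 h6 <;>
      simp only [char_lt_toNat, show ('A' : Char).toNat = 65 from rfl,
        show ('F' : Char).toNat = 70 from rfl] at * <;>
      simp only [show ('A' : Char).toNat = 65 from rfl, show ('B' : Char).toNat = 66 from rfl,
        show ('C' : Char).toNat = 67 from rfl, show ('D' : Char).toNat = 68 from rfl,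
        show ('E' : Char).toNat = 69 from rfl, show ('F' : Char).toNat = 70 from rfl] <;>
      simp <;> omega
  | c :: d :: rest =>
    simp [pyStrLe]
    omega

-- ===== VERDICT (by name: the statement is the Claim_ definition above) =====
theorem acceptString_spec : Claim_equal_acceptString := by
  intro s _
  unfold Spec_acceptString acceptString acceptString_alt
  simpa [PySem.Str.len] using accept_eq_on_list s.toList
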